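-- pv_equiv track=rewrite | github.com/aaditya9803/py | roots.py | add_multiplier
-- ===== SOURCE A (Python) =====
-- def add_multiplier(the_func):
--     the_func = [*the_func]
--     for i in range(len(the_func)):
--         if the_func[i] == 'x':
--             if i==0 and the_func[0] == 'x' or (the_func[i-1] =='+' or the_func[i-1] =='-'):
--                 continue
--             else:
--                 the_func[i] = '*x'
--     return ''.join(the_func)
-- ===== SOURCE B (Python) =====
-- def add_multiplier(the_func):
--     def render(seg):
--         return ''.join(seg[:1] + ['*x' if e == 'x' else e for e in seg[1:]])
--     out = []
--     seg = []
--     for e in the_func: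
--         if e == '+' or e == '-':
--             out.append(render(seg))
--             out.append(e)
--             seg = []
--         else:
--             seg.append(e)
--     out.append(render(seg))
--     return ''.join(out)
-- ===== Notes on version B (the rewrite author's own statement) =====
-- stated objective: alternative
-- what changed: Replaces A's index loop with its prev-element (i-1) inspection by a segmentation algorithm: the list is split at '+'/'-' delimiters and each segment is rendered positionally ('x' becomes '*x' everywhere except at a segment's first slot), so no element ever looks at its predecessor.
import Mathlib
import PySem

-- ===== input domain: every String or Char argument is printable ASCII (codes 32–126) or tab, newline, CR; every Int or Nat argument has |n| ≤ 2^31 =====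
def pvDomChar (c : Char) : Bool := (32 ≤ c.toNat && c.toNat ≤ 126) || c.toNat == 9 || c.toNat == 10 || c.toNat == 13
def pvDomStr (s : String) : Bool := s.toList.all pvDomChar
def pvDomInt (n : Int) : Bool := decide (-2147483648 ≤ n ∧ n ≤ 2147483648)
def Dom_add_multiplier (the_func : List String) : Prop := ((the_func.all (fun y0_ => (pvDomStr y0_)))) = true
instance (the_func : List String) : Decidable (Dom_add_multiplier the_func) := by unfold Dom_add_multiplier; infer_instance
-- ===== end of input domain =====

-- B replaces A's index loop (element vs. element at i-1) by splitting the list at '+'/'-'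
-- delimiters and rendering each segment positionally; alternative algorithm, same cost.

-- ===== PORT A =====
-- the loop body of A, reading and updating the evolving list at i, i-1 and 0
def pvStepA (l : List String) (i : Int) : List String :=
  if PySem.List.pyGetD l i "" = "x" then
    if (i = 0 ∧ PySem.List.pyGetD l 0 "" = "x") ∨
        (PySem.List.pyGetD l (i - 1) "" = "+" ∨ PySem.List.pyGetD l (i - 1) "" = "-") then l
    else PySem.List.pySetD l i "*x"
  else l

def add_multiplier (the_func : List String) : String :=
  PySem.Str.join "" ((PySem.List.pyRange 0 (the_func.length : Int) 1).foldl pvStepA the_func)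

-- ===== PORT B =====
-- render(seg): the segment's first element verbatim, every later 'x' as '*x'
def pvRender (seg : List String) : String :=
  PySem.Str.join "" (seg.take 1 ++ (seg.drop 1).map (fun e => if e = "x" then "*x" else e))

def add_multiplier_alt (the_func : List String) : String :=
  let st := the_func.foldl
    (fun (p : List String × List String) e =>
      if e = "+" ∨ e = "-" then (p.1 ++ [pvRender p.2, e], []) else (p.1, p.2 ++ [e]))
    ([], [])
  PySem.Str.join "" (st.1 ++ [pvRender st.2])

-- ===== PRECONDITION & SPEC =====
def Spec_add_multiplier (the_func : List String) (out : String) : Prop := out = add_multiplier_alt the_func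
instance (the_func : List String) (out : String) : Decidable (Spec_add_multiplier the_func out) := by unfold Spec_add_multiplier; infer_instance

-- ===== CLAIM (what is proved, stated in full; the proofs are below) =====
def Claim_equal_add_multiplier : Prop := ∀ (the_func : List String), Dom_add_multiplier the_func → Spec_add_multiplier the_func (add_multiplier the_func)

-- ===== LEMMAS AND PROOFS =====

-- join with empty separator: basic algebra
theorem pvIntercalate_nil (l : List (List Char)) : [].intercalate l = l.flatten := by
  induction l with
  | nil => rfl
  | cons h t ih =>
    cases t with
    | nil => simp [List.intercalate]
    | cons h2 t2 => simp_all [List.intercalate, List.intersperse]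

theorem pvJoin_nil : PySem.Str.join "" [] = "" := rfl

theorem pvJoin_singleton (s : String) : PySem.Str.join "" [s] = s := by
  simp [PySem.Str.join, PySem.Chars.join, pvIntercalate_nil]

theorem pvJoin_append (a b : List String) :
    PySem.Str.join "" (a ++ b) = PySem.Str.join "" a ++ PySem.Str.join "" b := by
  simp [PySem.Str.join, PySem.Chars.join, pvIntercalate_nil]

theorem pvJoin_cons (h : String) (t : List String) :
    PySem.Str.join "" (h :: t) = h ++ PySem.Str.join "" t := by
  simpa [pvJoin_singleton] using pvJoin_append [h] t

-- the common pairwise description of the result list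
def pvGo (prev : String) : List String → List String
  | [] => []
  | c :: t => (if c = "x" ∧ prev ≠ "+" ∧ prev ≠ "-" then "*x" else c) :: pvGo c t

def pvSpec : List String → List String
  | [] => []
  | h :: t => h :: pvGo h t

theorem pvGo_length (prev : String) (t : List String) : (pvGo prev t).length = t.length := by
  induction t generalizing prev with
  | nil => rfl
  | cons c t ih => simp [pvGo, ih]

theorem pvSpec_length (l : List String) : (pvSpec l).length = l.length := by
  cases l with
  | nil => rfl
  | cons h t => simp [pvSpec, pvGo_length]

theorem pvGo_getD (prev : String) (t : List String) (i : Nat) (h : i < t.length) :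
    (pvGo prev t).getD i "" =
      if t.getD i "" = "x" ∧ (if i = 0 then prev else t.getD (i - 1) "") ≠ "+" ∧
          (if i = 0 then prev else t.getD (i - 1) "") ≠ "-" then "*x" else t.getD i "" := by
  induction t generalizing prev i with
  | nil => simp at h
  | cons c t ih =>
    cases i with
    | zero => simp [pvGo]
    | succ i =>
      simp only [pvGo, List.getD_cons_succ]
      rw [ih c i (by simpa using h)]
      cases i with
      | zero => simp
      | succ j => simp

theorem pvSpec_getD_zero (l : List String) : (pvSpec l).getD 0 "" = l.getD 0 "" := by
  cases l with
  | nil => rfl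
  | cons h t => simp [pvSpec]

theorem pvSpec_getD (l : List String) (i : Nat) (h : i < l.length) (h0 : 0 < i) :
    (pvSpec l).getD i "" =
      if l.getD i "" = "x" ∧ l.getD (i - 1) "" ≠ "+" ∧ l.getD (i - 1) "" ≠ "-" then "*x"
      else l.getD i "" := by
  cases l with
  | nil => simp at h
  | cons hd t =>
    cases i with
    | zero => omega
    | succ i =>
      simp only [pvSpec, List.getD_cons_succ]
      rw [pvGo_getD hd t i (by simpa using h)]
      cases i with
      | zero => simp
      | succ j => simp

-- being "+" or "-" is unchanged by the rewrite (only "x" becomes "*x")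
theorem pvSpec_pm (l : List String) (i : Nat) (h : i < l.length) (s : String)
    (hs : s = "+" ∨ s = "-") : ((pvSpec l).getD i "" = s) ↔ (l.getD i "" = s) := by
  cases i with
  | zero => rw [pvSpec_getD_zero]
  | succ i =>
    rw [pvSpec_getD l (i + 1) h (by omega)]
    split_ifs with hc
    · obtain ⟨h1, -, -⟩ := hc
      rcases hs with rfl | rfl <;> constructor <;> intro h2 <;>
        first
          | exact absurd h2 (by decide)
          | (rw [h2] at h1; exact absurd h1 (by decide))
    · rfl

-- the invariant of A's loop: after the first k iterations the list is
-- pvSpec on the first k positions and untouched after them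
theorem pvA_inv (orig : List String) (k : Nat) (hk : k ≤ orig.length) :
    (PySem.List.pyRange 0 (k : Int) 1).foldl pvStepA orig =
      (pvSpec orig).take k ++ orig.drop k := by
  induction k with
  | zero => simp [PySem.List.pyRange_one_eq_nil]
  | succ k ih =>
    have hk' : k ≤ orig.length := by omega
    have hkn : k < orig.length := by omega
    have hrange : PySem.List.pyRange 0 ((k + 1 : Nat) : Int) 1 =
        PySem.List.pyRange 0 (k : Int) 1 ++ [(k : Int)] := by
      push_cast
      exact PySem.List.pyRange_one_succ_right (by positivity)
    rw [hrange, List.foldl_append, ih hk']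
    simp only [List.foldl_cons, List.foldl_nil]
    have hSlen : (pvSpec orig).length = orig.length := pvSpec_length orig
    have htake : ((pvSpec orig).take k).length = k := by
      simp [hSlen]; omega
    have hget_k : PySem.List.pyGetD ((pvSpec orig).take k ++ orig.drop k) (k : Int) "" =
        orig.getD k "" := by
      rw [PySem.List.pyGetD_natCast, List.getD_eq_getElem?_getD,
        List.getElem?_append_right htake.le, htake, Nat.sub_self,
        List.getElem?_drop, Nat.add_zero, ← List.getD_eq_getElem?_getD]
    have hdropk : orig.drop k = orig.getD k "" :: orig.drop (k + 1) := by
      rw [List.drop_eq_getElem_cons hkn, List.getD_eq_getElem _ _ hkn]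
    have htakeSk : (pvSpec orig).take (k + 1) =
        (pvSpec orig).take k ++ [(pvSpec orig).getD k ""] := by
      rw [List.take_add_one, List.getElem?_eq_getElem (by omega : k < (pvSpec orig).length),
        List.getD_eq_getElem _ _ (by omega : k < (pvSpec orig).length)]
      rfl
    by_cases hk0 : k = 0
    · subst hk0
      cases orig with
      | nil => simp at hkn
      | cons o rest =>
        by_cases ho : o = "x" <;>
          simp [pvStepA, pvSpec, ho, PySem.List.pyGetD_zero_cons]
    -- k ≥ 1
    have hk1 : 1 ≤ k := by omega
    have hci : (k : Int) - 1 = ((k - 1 : Nat) : Int) := by push_cast [hk1]; ring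
    have hprev : PySem.List.pyGetD ((pvSpec orig).take k ++ orig.drop k) ((k : Int) - 1) "" =
        (pvSpec orig).getD (k - 1) "" := by
      rw [hci, PySem.List.pyGetD_natCast, List.getD_eq_getElem?_getD,
        List.getElem?_append_left (by omega : k - 1 < ((pvSpec orig).take k).length),
        List.getElem?_take_of_lt (by omega : k - 1 < k), ← List.getD_eq_getElem?_getD]
    have hk1n : k - 1 < orig.length := by omega
    have hSgetk := pvSpec_getD orig k hkn (by omega)
    unfold pvStepA
    rw [hget_k, hprev]
    have hknot : ¬ ((k : Int) = 0 ∧ PySem.List.pyGetD ((pvSpec orig).take k ++ orig.drop k) 0 "" = "x") := by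
      intro hc
      exact hk0 (by exact_mod_cast hc.1)
    by_cases hx : orig.getD k "" = "x"
    · by_cases hpm : (pvSpec orig).getD (k - 1) "" = "+" ∨ (pvSpec orig).getD (k - 1) "" = "-"
      · -- skipped: prev is + or -
        rw [if_pos hx, if_pos (Or.inr hpm)]
        have hpm' : orig.getD (k - 1) "" = "+" ∨ orig.getD (k - 1) "" = "-" := by
          rcases hpm with h | h
          · exact Or.inl ((pvSpec_pm orig (k - 1) hk1n "+" (Or.inl rfl)).mp h)
          · exact Or.inr ((pvSpec_pm orig (k - 1) hk1n "-" (Or.inr rfl)).mp h)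
        have : (pvSpec orig).getD k "" = orig.getD k "" := by
          rw [hSgetk, if_neg]; rintro ⟨-, h1, h2⟩
          rcases hpm' with h | h
          · exact h1 h
          · exact h2 h
        rw [htakeSk, this, List.append_assoc, List.singleton_append, ← hdropk]
      · -- rewritten to "*x"
        rw [not_or] at hpm
        rw [if_pos hx, if_neg]
        · have hpm' : ¬ orig.getD (k - 1) "" = "+" ∧ ¬ orig.getD (k - 1) "" = "-" := by
            constructor
            · intro h; exact hpm.1 ((pvSpec_pm orig (k - 1) hk1n "+" (Or.inl rfl)).mpr h)
            · intro h; exact hpm.2 ((pvSpec_pm orig (k - 1) hk1n "-" (Or.inr rfl)).mpr h)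
          have hSk : (pvSpec orig).getD k "" = "*x" := by
            rw [hSgetk, if_pos ⟨hx, hpm'.1, hpm'.2⟩]
          rw [PySem.List.pySetD_natCast]
          have : ((pvSpec orig).take k ++ orig.drop k).set k "*x" =
              (pvSpec orig).take k ++ (orig.drop k).set 0 "*x" := by
            have h1 := List.set_append_right (s := (pvSpec orig).take k) (t := orig.drop k)
              ((pvSpec orig).take k).length "*x" le_rfl
            rw [Nat.sub_self] at h1
            rwa [htake] at h1
          rw [this, hdropk, List.set_cons_zero, htakeSk, hSk, List.append_assoc,
            List.singleton_append]
        · rintro (hc | hc | hc)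
          · exact hknot hc
          · exact hpm.1 hc
          · exact hpm.2 hc
    · -- element is not "x": untouched
      rw [if_neg hx]
      have : (pvSpec orig).getD k "" = orig.getD k "" := by
        rw [hSgetk, if_neg]; rintro ⟨h1, -⟩; exact hx h1
      rw [htakeSk, this, List.append_assoc, List.singleton_append, ← hdropk]

-- flag form of the pairwise description: prot = "current position is protected"
def pvG (prot : Bool) : List String → List String
  | [] => []
  | c :: t => (if c = "x" ∧ prot = false then "*x" else c) :: pvG (decide (c = "+" ∨ c = "-")) t

theorem pvGo_eq_pvG (prev : String) (t : List String) :
    pvGo prev t = pvG (decide (prev = "+" ∨ prev = "-")) t := by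
  induction t generalizing prev with
  | nil => rfl
  | cons c t ih =>
    simp only [pvGo, pvG, ih c]
    congr 1
    by_cases h1 : prev = "+" <;> by_cases h2 : prev = "-" <;> simp [h1, h2]

theorem pvSpec_eq_pvG (l : List String) : pvSpec l = pvG true l := by
  cases l with
  | nil => rfl
  | cons h t => simp [pvSpec, pvG, pvGo_eq_pvG]

-- the rendered form of a pending segment
def pvGseg (seg : List String) : List String :=
  seg.take 1 ++ (seg.drop 1).map (fun e => if e = "x" then "*x" else e)

theorem pvRender_eq (seg : List String) : pvRender seg = PySem.Str.join "" (pvGseg seg) := rfl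

theorem pvGseg_append (seg : List String) (e : String) :
    pvGseg (seg ++ [e]) = pvGseg seg ++ [if e = "x" ∧ seg ≠ [] then "*x" else e] := by
  cases seg with
  | nil => simp [pvGseg]
  | cons h t => by_cases he : e = "x" <;> simp [pvGseg, he]

-- invariant of B's fold: chunks produced so far ++ pending segment ++ rest of the input
theorem pvB_inv (l : List String) (out seg : List String) :
    PySem.Str.join ""
        ((l.foldl
            (fun (p : List String × List String) e =>
              if e = "+" ∨ e = "-" then (p.1 ++ [pvRender p.2, e], []) else (p.1, p.2 ++ [e]))
            (out, seg)).1 ++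
          [pvRender
            (l.foldl
              (fun (p : List String × List String) e =>
                if e = "+" ∨ e = "-" then (p.1 ++ [pvRender p.2, e], []) else (p.1, p.2 ++ [e]))
              (out, seg)).2]) =
      PySem.Str.join "" out ++ PySem.Str.join "" (pvGseg seg) ++
        PySem.Str.join "" (pvG (decide (seg = [])) l) := by
  induction l generalizing out seg with
  | nil =>
    simp only [List.foldl_nil, pvG, pvJoin_nil, pvJoin_append, pvRender_eq, pvJoin_singleton]
    rw [String.append_empty]
  | cons e t ih =>
    simp only [List.foldl_cons]
    by_cases hd : e = "+" ∨ e = "-"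
    · rw [if_pos hd]
      rw [ih]
      have hex : ¬ (e = "x") := by rcases hd with rfl | rfl <;> decide
      simp only [pvG, pvGseg, List.take_nil, List.drop_nil, List.map_nil, List.append_nil,
        pvJoin_nil]
      have hdec : decide (e = "+" ∨ e = "-") = true := by simp [hd]
      rw [hdec, if_neg (by simp [hex])]
      simp only [pvJoin_cons, pvJoin_nil, pvJoin_append, pvRender_eq, pvGseg,
        String.append_empty, String.append_assoc, decide_true]
    · rw [if_neg hd]
      rw [ih]
      have hne : (seg ++ [e] : List String) ≠ [] := by simp
      rw [pvGseg_append]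
      have hdec : decide (e = "+" ∨ e = "-") = false := by simpa using hd
      simp only [pvG, hdec]
      have hcond : (if e = "x" ∧ seg ≠ [] then "*x" else e) =
          (if e = "x" ∧ decide (seg = []) = false then "*x" else e) := by
        by_cases hseg : seg = ([] : List String) <;> simp [hseg]
      rw [hcond]
      simp only [pvJoin_cons, pvJoin_append, String.append_assoc, pvJoin_nil, hne,
        decide_eq_false_iff_not, String.empty_append]
      simp

-- ===== VERDICT (by name: the statement is the Claim_ definition above) =====
theorem add_multiplier_spec : Claim_equal_add_multiplier := by
  intro the_func _
  unfold Spec_add_multiplier add_multiplier add_multiplier_alt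
  rw [pvA_inv the_func the_func.length le_rfl,
    List.take_of_length_le (pvSpec_length the_func).le, List.drop_length, List.append_nil]
  show _ = PySem.Str.join "" _
  rw [pvB_inv the_func [] []]
  simp only [pvGseg, List.take_nil, List.drop_nil, List.map_nil, List.append_nil, pvJoin_nil,
    decide_true]
  rw [String.empty_append, String.empty_append, pvSpec_eq_pvG]
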